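-- pv_equiv track=rewrite | github.com/hannayangg/penwing | # ridi/77.py | F
-- ===== SOURCE A (Python) =====
-- def F(s, k):
--   count = {}
--   l, r = 0, 0
--   res = 0
--   while r < len(s):
--     count[s[r]] = 1 + count.get(s[r], 0)
--
--     # 해쉬맵 최댓값 확인
--     tmp = 0
--     common = ''
--     for c in count:
--       if count[c] > tmp:
--         tmp = count[c]
--         common = c
--
--     # VALID 조건 확인, result 업데이트
--     windowLen = (r-l+1)
--     if windowLen - count[common] <= k:
--       res = max(res, windowLen)
--       r += 1
--     else:
--       count[s[l]] -= 1
--       l += 1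
--       r += 1
--
--   return res
-- ===== SOURCE B (Python) =====
-- def F(s, k):
--     # Sliding window: the window maximum frequency is maintained
--     # incrementally with a count-of-counts table instead of rescanning
--     # the whole frequency dict at every step.
--     cnt = {}
--     freq = {}   # freq[v] = number of distinct chars whose window count is v (v >= 1)
--     maxf = 0
--     l = 0
--     res = 0
--     for r in range(len(s)):
--         c = s[r]
--         old = cnt.get(c, 0)
--         v = old + 1
--         cnt[c] = v
--         if old:
--             freq[old] -= 1
--         freq[v] = freq.get(v, 0) + 1
--         if v > maxf:
--             maxf = v
--         if (r - l + 1) - maxf <= k: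
--             if r - l + 1 > res:
--                 res = r - l + 1
--         else:
--             d = s[l]
--             w = cnt[d]
--             cnt[d] = w - 1
--             freq[w] -= 1
--             freq[w - 1] = freq.get(w - 1, 0) + 1
--             if w == maxf and freq[w] == 0:
--                 maxf -= 1
--             l += 1
--     return res
-- ===== Notes on version B (the rewrite author's own statement) =====
-- stated objective: alternative
-- what changed: Instead of rescanning the whole count dict for its maximum at every step, B maintains the window's maximum frequency incrementally with a count-of-counts table (freq[v] = how many chars occur v times), updating it in O(1) per step.
import Mathlib
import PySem

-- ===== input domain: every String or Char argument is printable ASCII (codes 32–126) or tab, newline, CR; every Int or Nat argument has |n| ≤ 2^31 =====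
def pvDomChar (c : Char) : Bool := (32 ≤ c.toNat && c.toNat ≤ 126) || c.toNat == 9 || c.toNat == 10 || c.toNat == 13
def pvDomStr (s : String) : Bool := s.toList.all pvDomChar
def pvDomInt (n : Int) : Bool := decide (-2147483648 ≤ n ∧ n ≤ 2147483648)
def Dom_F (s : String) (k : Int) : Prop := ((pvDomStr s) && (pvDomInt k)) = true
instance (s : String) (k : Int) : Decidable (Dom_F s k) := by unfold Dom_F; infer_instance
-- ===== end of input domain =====

-- B replaces A's per-step rescan of the count dict by incremental maximum-frequency
-- maintenance with a count-of-counts table (objective: alternative; O(1) per step instead of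
-- a scan over the distinct chars — measured only ~1.2x in a timing run, so not claimed faster).

-- ===== PORT A =====
-- the inner `for c in count` scan: fold over the dict items carrying (tmp, common)
def scanA : List (Char × Int) → Int × Option Char → Int × Option Char
  | [], acc => acc
  | (c, v) :: rest, (tmp, common) =>
      if v > tmp then scanA rest (v, some c) else scanA rest (tmp, common)

def loopA (cs : List Char) (k : Int) : Nat → PySem.Dict Char Int → Int → Int → Int → Int
  | 0, _, _, _, res => res
  | fuel+1, count, l, r, res =>
      let c := (PySem.List.pyGet? cs r).getD ' '        -- s[r]; always in range (r < len(s))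
      let count := count.insert c (1 + count.getD c 0)
      let tc := scanA count.items (0, none)
      -- count[common]: Python would raise KeyError if common were still ''; in a real
      -- run tmp ≥ 1 after the insert, so the `none` default 0 is never reached
      let cval := match tc.2 with
        | some ch => count.getD ch 0
        | none => 0
      let windowLen := r - l + 1
      if windowLen - cval ≤ k then
        loopA cs k fuel count l (r+1) (max res windowLen)
      else
        let d := (PySem.List.pyGet? cs l).getD ' '      -- s[l]; always in range (0 ≤ l ≤ r)
        loopA cs k fuel (count.insert d (count.getD d 0 - 1)) (l+1) (r+1) res

def F (s : String) (k : Int) : Int :=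
  loopA s.toList k s.toList.length PySem.Dict.empty 0 0 0

-- ===== PORT B =====
def loopB (cs : List Char) (k : Int) :
    Nat → PySem.Dict Char Int → PySem.Dict Int Int → Int → Int → Int → Int → Int
  | 0, _, _, _, _, _, res => res
  | fuel+1, cnt, freq, maxf, l, r, res =>
      let c := (PySem.List.pyGet? cs r).getD ' '        -- s[r]; always in range
      let old := cnt.getD c 0
      let v := old + 1
      let cnt := cnt.insert c v
      -- freq[old] -= 1 (only when old ≠ 0; key then present in a real run)
      let freq := if old ≠ 0 then freq.insert old (freq.getD old 0 - 1) else freq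
      let freq := freq.insert v (freq.getD v 0 + 1)
      let maxf := if v > maxf then v else maxf
      if (r - l + 1) - maxf ≤ k then
        let res := if r - l + 1 > res then r - l + 1 else res
        loopB cs k fuel cnt freq maxf l (r+1) res
      else
        let d := (PySem.List.pyGet? cs l).getD ' '      -- s[l]; always in range
        let w := cnt.getD d 0                           -- cnt[d]; key present in a real run
        let cnt := cnt.insert d (w - 1)
        let freq := freq.insert w (freq.getD w 0 - 1)   -- freq[w] -= 1; key present in a real run
        let freq := freq.insert (w-1) (freq.getD (w-1) 0 + 1)
        let maxf := if w == maxf && freq.getD w 0 == 0 then maxf - 1 else maxf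
        loopB cs k fuel cnt freq maxf (l+1) (r+1) res

def F_alt (s : String) (k : Int) : Int :=
  loopB s.toList k s.toList.length PySem.Dict.empty PySem.Dict.empty 0 0 0 0

-- ===== PRECONDITION & SPEC =====
def Spec_F (s : String) (k : Int) (out : Int) : Prop := out = F_alt s k
instance (s : String) (k : Int) (out : Int) : Decidable (Spec_F s k out) := by unfold Spec_F; infer_instance

-- ===== CLAIM (what is proved, stated in full; the proofs are below) =====
def Claim_equal_F : Prop := ∀ (s : String) (k : Int), Dom_F s k → Spec_F s k (F s k)

-- ===== LEMMAS AND PROOFS =====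

-- fst of A's scan is a running maximum of the values
theorem scanA_fst : ∀ (its : List (Char × Int)) (t : Int) (o : Option Char),
    (scanA its (t, o)).1 = (its.map Prod.snd).foldl max t := by
  intro its
  induction its with
  | nil => intro t o; simp [scanA]
  | cons p rest ih =>
    intro t o
    obtain ⟨c, v⟩ := p
    simp only [scanA, List.map_cons, List.foldl_cons]
    split_ifs with h
    · rw [ih, max_eq_right h.le]
    · rw [ih, max_eq_left (by omega)]

-- snd of A's scan: unchanged, or some key paired with the returned value
theorem scanA_snd : ∀ (its : List (Char × Int)) (t : Int) (o : Option Char),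
    ((scanA its (t, o)).2 = o ∧ (scanA its (t, o)).1 = t) ∨
    ∃ p ∈ its, (scanA its (t, o)).2 = some p.1 ∧ (scanA its (t, o)).1 = p.2 := by
  intro its
  induction its with
  | nil => intro t o; left; simp [scanA]
  | cons p rest ih =>
    intro t o
    obtain ⟨c, v⟩ := p
    simp only [scanA]
    split_ifs with h
    · rcases ih v (some c) with ⟨h2, h1⟩ | ⟨q, hq, h2, h1⟩
      · right; exact ⟨(c, v), by simp, h2, h1⟩
      · right; exact ⟨q, by simp [hq], h2, h1⟩
    · rcases ih t o with ⟨h2, h1⟩ | ⟨q, hq, h2, h1⟩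
      · left; exact ⟨h2, h1⟩
      · right; exact ⟨q, by simp [hq], h2, h1⟩

theorem foldl_max_init (l : List Int) : ∀ a b : Int, l.foldl max (max a b) = max a (l.foldl max b) := by
  induction l with
  | nil => intro a b; simp
  | cons x t ih =>
    intro a b
    simp only [List.foldl_cons]
    rw [max_assoc, ih]

theorem vmax_split (V1 V2 : List Int) (x : Int) :
    (V1 ++ x :: V2).foldl max 0 = max x ((V1 ++ V2).foldl max 0) := by
  simp only [List.foldl_append, List.foldl_cons]
  rw [max_comm _ x, foldl_max_init]

theorem vmax_attain (l : List Int) : ∀ b : Int, l.foldl max b = b ∨ l.foldl max b ∈ l := by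
  induction l with
  | nil => intro b; left; simp
  | cons x t ih =>
    intro b
    simp only [List.foldl_cons]
    rcases ih (max b x) with h | h
    · rw [h]
      rcases le_total b x with hx | hx
      · right; rw [max_eq_right hx]; simp
      · left; rw [max_eq_left hx]
    · right; simp [h]

theorem split_of_mem_keys : ∀ (its : List (Char × Int)) (c : Char),
    (its.map Prod.fst).Nodup → c ∈ its.map Prod.fst →
    ∃ I1 v I2, its = I1 ++ (c, v) :: I2 ∧ (∀ p ∈ I1, p.1 ≠ c) ∧ (∀ p ∈ I2, p.1 ≠ c) := by
  intro its
  induction its with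
  | nil => intro c _ h; simp at h
  | cons q rest ih =>
    intro c hnd hmem
    simp only [List.map_cons, List.nodup_cons] at hnd
    rcases List.mem_cons.mp hmem with h | h
    · subst h
      refine ⟨[], q.2, rest, by simp, by simp, ?_⟩
      intro p hp hpc
      exact hnd.1 (by rw [← hpc]; exact List.mem_map_of_mem hp)
    · obtain ⟨I1, v, I2, heq, h1, h2⟩ := ih c hnd.2 h
      refine ⟨q :: I1, v, I2, by simp [heq], ?_, h2⟩
      intro p hp
      rcases List.mem_cons.mp hp with rfl | hp'
      · intro hpc; exact hnd.1 (by rw [hpc]; exact h)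
      · exact h1 p hp'

theorem dict_split (d : PySem.Dict Char Int) (c : Char) (hnd : d.keys.Nodup)
    (hc : d.contains c = true) :
    ∃ I1 I2 : List (Char × Int),
      d.items = I1 ++ (c, d.getD c 0) :: I2 ∧
      (∀ p ∈ I1, p.1 ≠ c) ∧ (∀ p ∈ I2, p.1 ≠ c) ∧
      ∀ u : Int, (d.insert c u).items = I1 ++ (c, u) :: I2 := by
  have hkeys : d.keys = d.items.map Prod.fst := rfl
  have hmem : c ∈ d.items.map Prod.fst := by
    rw [← hkeys]; exact (PySem.Dict.contains_iff_mem_keys d c).mp hc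
  obtain ⟨I1, v, I2, heq, h1, h2⟩ := split_of_mem_keys d.items c (by rw [← hkeys]; exact hnd) hmem
  have hv : d.getD c 0 = v :=
    PySem.Dict.getD_of_mem_items d (by rw [heq]; simp) hnd 0
  refine ⟨I1, I2, by rw [heq, hv], h1, h2, ?_⟩
  intro u
  rw [PySem.Dict.items_insert_of_contains d u hc, heq]
  simp only [List.map_append, List.map_cons]
  congr 1
  · apply List.map_congr_left ?_ |>.trans (List.map_id I1)
    intro p hp
    simp [h1 p hp]
  · congr 1
    · simp
    · apply List.map_congr_left ?_ |>.trans (List.map_id I2)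
      intro p hp
      simp [h2 p hp]

theorem loop_eq (cs : List Char) (k : Int) :
    ∀ (fuel : Nat) (d : PySem.Dict Char Int) (freq : PySem.Dict Int Int)
      (maxf res : Int) (ln rn : Nat),
      rn + fuel = cs.length → ln ≤ rn →
      d.keys.Nodup →
      (∀ ch, d.getD ch 0 = (((cs.take rn).drop ln).count ch : Int)) →
      maxf = (d.values).foldl max 0 →
      (∀ v : Int, 1 ≤ v → freq.getD v 0 = ((d.values).count v : Int)) →
      loopA cs k fuel d (ln : Int) (rn : Int) res
        = loopB cs k fuel d freq maxf (ln : Int) (rn : Int) res := by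
  intro fuel
  induction fuel with
  | zero => intro d freq maxf res ln rn _ _ _ _ _ _; rfl
  | succ fuel ih =>
    intro d freq maxf res ln rn hlen hlr hnd hWI hmax hFI
    have hvalues : ∀ (dd : PySem.Dict Char Int), dd.values = dd.items.map Prod.snd := fun _ => rfl
    have hrlt : rn < cs.length := by omega
    have hcr : (PySem.List.pyGet? cs (rn : Int)).getD ' ' = cs[rn] := by simp [hrlt]
    have hx0 : 0 ≤ d.getD cs[rn] 0 := by rw [hWI]; positivity
    have htake : cs.take (rn+1) = cs.take rn ++ [cs[rn]] := by
      rw [List.take_add_one]; simp [List.getElem?_eq_getElem hrlt]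
    have hW1eq : (cs.take (rn+1)).drop ln = (cs.take rn).drop ln ++ [cs[rn]] := by
      rw [htake, List.drop_append_of_le_length (by simp [List.length_take]; omega)]
    -- unfold one iteration of both loops
    simp only [loopA, loopB]
    rw [hcr, add_comm 1 (d.getD cs[rn] 0)]
    set d1 := d.insert cs[rn] (d.getD cs[rn] 0 + 1) with hd1
    have hnd1 : d1.keys.Nodup := PySem.Dict.nodup_keys_insert d _ _ hnd
    have hWI1 : ∀ ch, d1.getD ch 0 = (((cs.take (rn+1)).drop ln).count ch : Int) := by
      intro ch
      rw [hd1, PySem.Dict.getD_insert, hW1eq]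
      by_cases h : ch = cs[rn]
      · rw [if_pos h, h]
        have hwc := hWI cs[rn]
        have hone : List.count cs[rn] (List.drop ln (List.take rn cs) ++ [cs[rn]])
            = List.count cs[rn] (List.drop ln (List.take rn cs)) + 1 := by
          simp [List.count_append]
        rw [hone]
        push_cast
        omega
      · rw [if_neg h]
        have hone : List.count ch (List.drop ln (List.take rn cs) ++ [cs[rn]])
            = List.count ch (List.drop ln (List.take rn cs)) := by
          rw [List.count_append]
          have hz : List.count ch [cs[rn]] = 0 :=
            List.count_eq_zero.mpr (by simp; exact fun hh => h hh)
          omega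
        rw [hone]
        exact hWI ch
    -- shape of the value list after the insert
    have hcases : (d.getD cs[rn] 0 = 0 ∧ d1.values = d.values ++ [d.getD cs[rn] 0 + 1]) ∨
        (∃ S1 S2 : List Int, d.values = S1 ++ d.getD cs[rn] 0 :: S2 ∧
          d1.values = S1 ++ (d.getD cs[rn] 0 + 1) :: S2) := by
      cases hcon : d.contains cs[rn] with
      | false =>
        left
        refine ⟨PySem.Dict.getD_of_not_contains d 0 hcon, ?_⟩
        rw [hvalues, hvalues, hd1, PySem.Dict.items_insert_of_not_contains d _ hcon]
        simp
      | true =>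
        right
        obtain ⟨I1, I2, hitems, _, _, hins⟩ := dict_split d cs[rn] hnd hcon
        refine ⟨I1.map Prod.snd, I2.map Prod.snd, ?_, ?_⟩
        · rw [hvalues, hitems]; simp
        · rw [hvalues, hd1, hins]; simp
    have hvmax1 : d1.values.foldl max 0
        = max (d.values.foldl max 0) (d.getD cs[rn] 0 + 1) := by
      rcases hcases with ⟨hx0', hv1⟩ | ⟨S1, S2, hv, hv1⟩
      · rw [hv1]
        have h := vmax_split d.values [] (d.getD cs[rn] 0 + 1)
        simp only [List.append_nil] at h
        rw [h, max_comm]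
      · rw [hv, hv1, vmax_split, vmax_split]
        simp only [max_def]; split_ifs <;> omega
    have hcount1 : ∀ u : Int, 1 ≤ u →
        ((d1.values.count u : Nat) : Int)
        = (d.values.count u : Int) + (if d.getD cs[rn] 0 + 1 = u then 1 else 0)
          - (if d.getD cs[rn] 0 = u then 1 else 0) := by
      intro u hu
      rcases hcases with ⟨hx0', hv1⟩ | ⟨S1, S2, hv, hv1⟩
      · rw [hv1, hx0']
        simp only [List.count_append, List.count_cons, List.count_nil, beq_iff_eq]
        push_cast
        split_ifs <;> omega
      · rw [hv, hv1]
        simp only [List.count_append, List.count_cons, beq_iff_eq]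
        push_cast
        split_ifs <;> omega
    have hFI1 : ∀ v : Int, 1 ≤ v →
        ((if d.getD cs[rn] 0 ≠ 0 then
            freq.insert (d.getD cs[rn] 0) (freq.getD (d.getD cs[rn] 0) 0 - 1) else freq).insert
          (d.getD cs[rn] 0 + 1)
          ((if d.getD cs[rn] 0 ≠ 0 then
            freq.insert (d.getD cs[rn] 0) (freq.getD (d.getD cs[rn] 0) 0 - 1) else freq).getD
            (d.getD cs[rn] 0 + 1) 0 + 1)).getD v 0
        = ((d1.values.count v : Nat) : Int) := by
      intro v hv
      have hcnt := hcount1 v hv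
      rw [PySem.Dict.getD_insert]
      by_cases hvx1 : v = d.getD cs[rn] 0 + 1
      · subst hvx1
        rw [if_pos rfl]
        have hf0 : (if d.getD cs[rn] 0 ≠ 0 then
            freq.insert (d.getD cs[rn] 0) (freq.getD (d.getD cs[rn] 0) 0 - 1) else freq).getD
            (d.getD cs[rn] 0 + 1) 0 = (d.values.count (d.getD cs[rn] 0 + 1) : Int) := by
          by_cases hxz : d.getD cs[rn] 0 = 0
          · rw [if_neg (by simp [hxz])]
            exact hFI _ (by omega)
          · rw [if_pos hxz, PySem.Dict.getD_insert, if_neg (by omega)]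
            exact hFI _ (by omega)
        rw [hf0, hcnt]
        split_ifs <;> omega
      · rw [if_neg hvx1]
        by_cases hvx : v = d.getD cs[rn] 0
        · subst hvx
          rw [if_pos (show ¬ d.getD cs[rn] 0 = 0 by omega), PySem.Dict.getD_insert, if_pos rfl,
            hFI _ (by omega), hcnt]
          split_ifs <;> omega
        · have hfv : (if d.getD cs[rn] 0 ≠ 0 then
              freq.insert (d.getD cs[rn] 0) (freq.getD (d.getD cs[rn] 0) 0 - 1) else freq).getD
              v 0 = (d.values.count v : Int) := by
            by_cases hxz : d.getD cs[rn] 0 = 0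
            · rw [if_neg (by simp [hxz])]; exact hFI v hv
            · rw [if_pos hxz, PySem.Dict.getD_insert, if_neg hvx]; exact hFI v hv
          rw [hfv, hcnt]
          split_ifs <;> omega
    have hmaxf1 : (if d.getD cs[rn] 0 + 1 > maxf then d.getD cs[rn] 0 + 1 else maxf)
        = d1.values.foldl max 0 := by
      rw [hvmax1, ← hmax]
      simp only [max_def]; split_ifs <;> omega
    have hcval : (match (scanA d1.items (0, none)).2 with
        | some ch => d1.getD ch 0
        | none => 0) = d1.values.foldl max 0 := by
      have hfst := scanA_fst d1.items 0 none
      rcases scanA_snd d1.items 0 none with ⟨h2, h1⟩ | ⟨p, hp, h2, h1⟩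
      · rw [h2]
        rw [h1] at hfst
        rw [hvalues, ← hfst]
      · rw [h2]
        have hgd := PySem.Dict.getD_of_mem_items d1
          (k := p.1) (v := p.2) (by simpa using hp) hnd1 0
        have hg : (match (some p.1 : Option Char) with
            | some ch => d1.getD ch 0
            | none => 0) = d1.getD p.1 0 := rfl
        rw [hg, hgd, ← h1, hfst, hvalues]
    rw [hcval, hmaxf1]
    -- name the updated count-of-counts dict
    generalize hfq : ((if d.getD cs[rn] 0 ≠ 0 then
        freq.insert (d.getD cs[rn] 0) (freq.getD (d.getD cs[rn] 0) 0 - 1) else freq).insert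
      (d.getD cs[rn] 0 + 1)
      ((if d.getD cs[rn] 0 ≠ 0 then
        freq.insert (d.getD cs[rn] 0) (freq.getD (d.getD cs[rn] 0) 0 - 1) else freq).getD
        (d.getD cs[rn] 0 + 1) 0 + 1)) = f1
    rw [hfq] at hFI1
    by_cases hcond : (rn : Int) - (ln : Int) + 1 - d1.values.foldl max 0 ≤ k
    · rw [if_pos hcond, if_pos hcond]
      have hres : max res ((rn : Int) - (ln : Int) + 1)
          = (if (rn : Int) - (ln : Int) + 1 > res then (rn : Int) - (ln : Int) + 1 else res) := by
        simp only [max_def]; split_ifs <;> omega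
      rw [hres]
      have hcast : (rn : Int) + 1 = ((rn + 1 : Nat) : Int) := by push_cast; ring
      rw [hcast]
      exact ih _ _ _ _ ln (rn+1) (by omega) (by omega) hnd1 hWI1 rfl hFI1
    · rw [if_neg hcond, if_neg hcond]
      have hlnlt : ln < cs.length := by omega
      have hcl : (PySem.List.pyGet? cs (ln : Int)).getD ' ' = cs[ln] := by simp [hlnlt]
      rw [hcl]
      set w := d1.getD cs[ln] 0 with hwdef
      have hwin : List.drop ln (List.take (rn+1) cs)
          = cs[ln] :: List.drop (ln+1) (List.take (rn+1) cs) := by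
        rw [List.drop_eq_getElem_cons (by simp [List.length_take]; omega)]
        congr 1
        exact List.getElem_take
      have hw1 : 1 ≤ w := by
        rw [hwdef, hWI1 cs[ln], hwin]
        have : 0 < List.count cs[ln] (cs[ln] :: List.drop (ln+1) (List.take (rn+1) cs)) := by
          simp
        omega
      have hcon1 : d1.contains cs[ln] = true := by
        cases hcc : d1.contains cs[ln] with
        | true => rfl
        | false =>
          have := PySem.Dict.getD_of_not_contains d1 0 hcc
          rw [← hwdef] at this
          omega
      obtain ⟨I1, I2, hitems, _, _, hins⟩ := dict_split d1 cs[ln] hnd1 hcon1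
      rw [← hwdef] at hitems
      have hval1 : d1.values = I1.map Prod.snd ++ w :: I2.map Prod.snd := by
        rw [hvalues, hitems]; simp
      have hval2 : (d1.insert cs[ln] (w - 1)).values
          = I1.map Prod.snd ++ (w - 1) :: I2.map Prod.snd := by
        rw [hvalues, hins]; simp
      have hnd2 : (d1.insert cs[ln] (w - 1)).keys.Nodup :=
        PySem.Dict.nodup_keys_insert d1 _ _ hnd1
      have hvmaxd1 : d1.values.foldl max 0
          = max w ((I1.map Prod.snd ++ I2.map Prod.snd).foldl max 0) := by
        rw [hval1, vmax_split]
      have hvmaxd2 : (d1.insert cs[ln] (w - 1)).values.foldl max 0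
          = max (w - 1) ((I1.map Prod.snd ++ I2.map Prod.snd).foldl max 0) := by
        rw [hval2, vmax_split]
      have hcw : ∀ u : Int, ((d1.values.count u : Nat) : Int)
          = ((I1.map Prod.snd ++ I2.map Prod.snd).count u : Int)
            + (if w = u then 1 else 0) := by
        intro u
        rw [hval1]
        simp only [List.count_append, List.count_cons, beq_iff_eq]
        push_cast
        split_ifs <;> omega
      have hcw2 : ∀ u : Int, (((d1.insert cs[ln] (w - 1)).values.count u : Nat) : Int)
          = ((I1.map Prod.snd ++ I2.map Prod.snd).count u : Int)
            + (if w - 1 = u then 1 else 0) := by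
        intro u
        rw [hval2]
        simp only [List.count_append, List.count_cons, beq_iff_eq]
        push_cast
        split_ifs <;> omega
      have hfw : ((f1.insert w (f1.getD w 0 - 1)).insert (w - 1)
            ((f1.insert w (f1.getD w 0 - 1)).getD (w - 1) 0 + 1)).getD w 0
          = ((I1.map Prod.snd ++ I2.map Prod.snd).count w : Int) := by
        rw [PySem.Dict.getD_insert, if_neg (by omega), PySem.Dict.getD_insert, if_pos rfl,
          hFI1 w hw1]
        have := hcw w
        rw [if_pos rfl] at this
        omega
      have hFI2 : ∀ v : Int, 1 ≤ v →
          ((f1.insert w (f1.getD w 0 - 1)).insert (w - 1)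
            ((f1.insert w (f1.getD w 0 - 1)).getD (w - 1) 0 + 1)).getD v 0
          = (((d1.insert cs[ln] (w - 1)).values.count v : Nat) : Int) := by
        intro v hv
        have hc1 := hcw v
        have hc2 := hcw2 v
        rw [PySem.Dict.getD_insert]
        by_cases hvw1 : v = w - 1
        · rw [if_pos hvw1, PySem.Dict.getD_insert, if_neg (by omega), hFI1 (w-1) (by omega)]
          rw [hvw1] at hc2 ⊢
          rw [if_pos rfl] at hc2
          have hc1' := hcw (w - 1)
          rw [if_neg (by omega)] at hc1'
          omega
        · rw [if_neg hvw1, PySem.Dict.getD_insert]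
          by_cases hvw : v = w
          · rw [if_pos hvw, hFI1 _ (by omega)]
            rw [hvw] at hc1 hc2 ⊢
            rw [if_pos rfl] at hc1
            rw [if_neg (by omega)] at hc2
            omega
          · rw [if_neg hvw, hFI1 v hv]
            rw [if_neg (show ¬ w = v by omega)] at hc1
            rw [if_neg (show ¬ w - 1 = v by omega)] at hc2
            omega
      have hWI2 : ∀ ch, (d1.insert cs[ln] (w - 1)).getD ch 0
          = (((cs.take (rn+1)).drop (ln+1)).count ch : Int) := by
        intro ch
        rw [PySem.Dict.getD_insert]
        have h1 := hWI1 ch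
        rw [hwin] at h1
        by_cases h : ch = cs[ln]
        · rw [if_pos h, h]
          rw [h] at h1
          rw [← hwdef] at h1
          have hcc : List.count cs[ln] (cs[ln] :: List.drop (ln+1) (List.take (rn+1) cs))
              = List.count cs[ln] (List.drop (ln+1) (List.take (rn+1) cs)) + 1 := by simp
          rw [hcc] at h1
          push_cast at h1 ⊢
          omega
        · rw [if_neg h]
          rw [List.count_cons] at h1
          have hne : (cs[ln] == ch) = false :=
            beq_eq_false_iff_ne.mpr (fun hh : cs[ln] = ch => h hh.symm)
          rw [hne] at h1
          simp at h1
          exact h1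
      -- the maintained maximum stays exact after the eviction
      have hattain := vmax_attain (I1.map Prod.snd ++ I2.map Prod.snd) 0
      have hbounds := PySem.List.le_foldl_max (I1.map Prod.snd ++ I2.map Prod.snd) 0
      have hm2 : (if (w == d1.values.foldl max 0) &&
            (((f1.insert w (f1.getD w 0 - 1)).insert (w - 1)
              ((f1.insert w (f1.getD w 0 - 1)).getD (w - 1) 0 + 1)).getD w 0 == 0) then
            d1.values.foldl max 0 - 1 else d1.values.foldl max 0)
          = (d1.insert cs[ln] (w - 1)).values.foldl max 0 := by
        rw [hfw, hvmaxd2, hvmaxd1]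
        simp only [Bool.and_eq_true, beq_iff_eq]
        split_ifs with hsc
        · obtain ⟨hwm, hcz⟩ := hsc
          have hvle : (I1.map Prod.snd ++ I2.map Prod.snd).foldl max 0 ≤ w := by
            rw [hwm]; exact le_max_right _ _
          have hvne : (I1.map Prod.snd ++ I2.map Prod.snd).foldl max 0 ≠ w := by
            intro he
            rcases hattain with h0 | hmem
            · omega
            · have := List.count_pos_iff.mpr hmem
              rw [he] at this
              have : (0:Int) < ((I1.map Prod.snd ++ I2.map Prod.snd).count w : Int) := by
                exact_mod_cast this
              omega
          rw [max_eq_left (by omega), max_eq_left (by omega)]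
        · rw [not_and_or] at hsc
          by_cases hwm : w = max w ((I1.map Prod.snd ++ I2.map Prod.snd).foldl max 0)
          · have hcnz := hsc.resolve_left (not_not_intro hwm)
            have hmem : w ∈ I1.map Prod.snd ++ I2.map Prod.snd := by
              rcases Nat.eq_zero_or_pos ((I1.map Prod.snd ++ I2.map Prod.snd).count w) with h0 | hpos
              · exact absurd (by exact_mod_cast congrArg (Nat.cast : Nat → Int) h0) hcnz
              · exact List.count_pos_iff.mp hpos
            have hwle := hbounds.2 w hmem
            have hle2 : (I1.map Prod.snd ++ I2.map Prod.snd).foldl max 0 ≤ w := by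
              rw [hwm]; exact le_max_right _ _
            have heq : (I1.map Prod.snd ++ I2.map Prod.snd).foldl max 0 = w := le_antisymm hle2 hwle
            rw [heq, max_eq_right (by omega), max_eq_right (by omega)]
          · have hwlt : w ≤ max w ((I1.map Prod.snd ++ I2.map Prod.snd).foldl max 0) :=
              le_max_left _ _
            rcases max_choice w ((I1.map Prod.snd ++ I2.map Prod.snd).foldl max 0) with he | he
            · exact absurd he.symm hwm
            · rw [he, max_eq_right (by omega)]
      rw [hm2]
      have hcastr : (rn : Int) + 1 = ((rn + 1 : Nat) : Int) := by push_cast; ring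
      have hcastl : (ln : Int) + 1 = ((ln + 1 : Nat) : Int) := by push_cast; ring
      rw [hcastr, hcastl]
      exact ih _ _ _ _ (ln+1) (rn+1) (by omega) (by omega) hnd2 hWI2 rfl hFI2

theorem F_spec' : ∀ (s : String) (k : Int), F s k = F_alt s k := by
  intro s k
  unfold F F_alt
  have := loop_eq s.toList k s.toList.length PySem.Dict.empty PySem.Dict.empty 0 0 0 0
    (by simp) (by simp) (by simp) (by simp [PySem.Dict.getD_empty])
    (by simp [PySem.Dict.values, PySem.Dict.empty]) (by intro v hv; simp [PySem.Dict.getD, PySem.Dict.get?, PySem.Dict.values, PySem.Dict.empty])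
  simpa using this

-- ===== VERDICT (by name: the statement is the Claim_ definition above) =====
theorem F_spec : Claim_equal_F := by
  intro s k _
  unfold Spec_F
  exact F_spec' s k
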